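-- pv_equiv track=rewrite | github.com/JosAikema/adventofcode2020 | day4/day4.py | convertToPassports
-- ===== SOURCE A (Python) =====
-- def convertToPassports(c):
--     passports = []
--     passport = ''
--     for line in c:
--         if line != '\n':
--             passport += line.replace("\n", " ")
--         else:
--             passports.append(passport)
--             passport = ''
--     #Last one has no newline after
--     passports.append(passport)
--     return passports
-- ===== SOURCE B (Python) =====
-- def convertToPassports(c):
--     s = ''.join('\n' if line == '\n' else line.replace('\n', ' ') for line in c)
--     return s.split('\n')
-- ===== Notes on version B (the rewrite author's own statement) =====
-- stated objective: simpler
-- what changed: Replaces the explicit accumulator loop (current passport string + list of finished passports) with a single join that maps blank lines to a '\n' separator and content lines to their newline-to-space replacement, then one str.split('\n'); split keeps empty segments, which reproduces the loop's empty-passport behaviour exactly.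
import Mathlib
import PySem

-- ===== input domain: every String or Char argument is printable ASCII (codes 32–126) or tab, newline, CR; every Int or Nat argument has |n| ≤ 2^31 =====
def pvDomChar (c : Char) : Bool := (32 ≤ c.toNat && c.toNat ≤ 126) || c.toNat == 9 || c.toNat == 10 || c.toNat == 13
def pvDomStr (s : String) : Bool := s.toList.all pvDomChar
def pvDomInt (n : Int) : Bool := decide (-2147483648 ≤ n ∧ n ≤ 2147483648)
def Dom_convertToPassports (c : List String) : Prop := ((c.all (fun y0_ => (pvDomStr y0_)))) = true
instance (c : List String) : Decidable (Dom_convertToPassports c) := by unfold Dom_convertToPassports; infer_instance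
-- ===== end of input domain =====

-- B replaces A's accumulator loop by one join (blank line -> '\n' separator, content line -> newline-to-space) followed by one split on '\n': simpler decomposition, same linear cost.


-- ===== PORT A =====
-- A: fold over the lines with state (passports, passport); append the current passport at the end.
def convertToPassports (c : List String) : List String :=
  let st := c.foldl
    (fun (st : List String × String) line =>
      if line ≠ "\n" then (st.1, st.2 ++ PySem.Str.replace line "\n" " ")
      else (st.1 ++ [st.2], ""))
    ([], "")
  st.1 ++ [st.2]

-- ===== PORT B =====
-- B: s = ''.join('\n' if line == '\n' else line.replace('\n', ' ') for line in c); return s.split('\n')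
def convertToPassports_alt (c : List String) : List String :=
  let s := PySem.Str.join ""
    (c.map (fun line => if line = "\n" then "\n" else PySem.Str.replace line "\n" " "))
  (PySem.Str.split? s "\n").getD []

-- ===== PRECONDITION & SPEC =====
def Spec_convertToPassports (c : List String) (out : List String) : Prop := out = convertToPassports_alt c
instance (c : List String) (out : List String) : Decidable (Spec_convertToPassports c out) := by unfold Spec_convertToPassports; infer_instance

-- ===== CLAIM (what is proved, stated in full; the proofs are below) =====
def Claim_equal_convertToPassports : Prop := ∀ (c : List String), Dom_convertToPassports c → Spec_convertToPassports c (convertToPassports c)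

-- ===== LEMMAS AND PROOFS =====
theorem pvReplaceGo_eq (fuel : Nat) : ∀ (l acc : List Char), l.length ≤ fuel →
    PySem.Chars.replace.go ['\n'] [' '] fuel l acc
      = acc.reverse ++ l.map (fun c => if c = '\n' then ' ' else c) := by
  induction fuel with
  | zero => intro l acc h; rw [List.length_eq_zero_iff.mp (Nat.le_zero.mp h)]
            simp [PySem.Chars.replace.go]
  | succ n ih =>
    intro l acc h
    match l with
    | [] => simp [PySem.Chars.replace.go]
    | c :: t =>
      rw [PySem.Chars.replace.go]
      by_cases hc : c = '\n'
      · subst hc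
        simp only [List.isPrefixOf]
        rw [ih]
        · simp
        · simpa using Nat.le_of_succ_le_succ h
      · rw [if_neg (by simp [List.isPrefixOf]; exact Ne.symm hc)]
        rw [ih]
        · simp [hc]
        · simpa using Nat.le_of_succ_le_succ h

def pvSplit : List Char → List (List Char)
  | [] => [[]]
  | c :: t => if c = '\n' then [] :: pvSplit t else (pvSplit t).modifyHead (c :: ·)

theorem pvSplitGo_eq (fuel : Nat) : ∀ (l cur : List Char) (acc : List (List Char)),
    l.length ≤ fuel →
    PySem.Chars.splitOn.go ['\n'] fuel l cur acc
      = acc.reverse ++ (pvSplit l).modifyHead (cur.reverse ++ ·) := by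
  induction fuel with
  | zero => intro l cur acc h; rw [List.length_eq_zero_iff.mp (Nat.le_zero.mp h)]
            simp [PySem.Chars.splitOn.go, pvSplit]
  | succ n ih =>
    intro l cur acc h
    match l with
    | [] => simp [PySem.Chars.splitOn.go, pvSplit]
    | c :: t =>
      rw [PySem.Chars.splitOn.go]
      by_cases hc : c = '\n'
      · subst hc
        simp only [List.isPrefixOf, Bool.and_true]
        rw [ih _ _ _ (by simpa using Nat.le_of_succ_le_succ h)]
        cases hs : pvSplit t <;> simp [pvSplit, hs]
      · rw [if_neg (by simp [List.isPrefixOf]; exact Ne.symm hc)]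
        rw [ih _ _ _ (by simpa using Nat.le_of_succ_le_succ h)]
        cases hs : pvSplit t <;> simp [pvSplit, hc, hs]

theorem pvReplace_eq (s : List Char) :
    PySem.Chars.replace s ['\n'] [' '] = s.map (fun c => if c = '\n' then ' ' else c) := by
  rw [PySem.Chars.replace, if_neg (by simp), pvReplaceGo_eq _ _ _ le_rfl]; rfl

theorem pvSplitOn_eq (s : List Char) : PySem.Chars.splitOn s ['\n'] = pvSplit s := by
  rw [PySem.Chars.splitOn, pvSplitGo_eq _ _ _ _ (by omega)]
  cases hs : pvSplit s <;> simp

theorem pvSplit_append (xs : List Char) : ∀ (ys : List Char), '\n' ∉ xs →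
    pvSplit (xs ++ ys) = (pvSplit ys).modifyHead (xs ++ ·) := by
  induction xs with
  | nil => intro ys _; cases hs : pvSplit ys <;> simp [hs]
  | cons c t ih =>
    intro ys hx
    have hc : ¬ c = '\n' := by rintro rfl; exact hx (List.mem_cons_self)
    rw [List.cons_append, pvSplit, if_neg hc, ih ys (fun m => hx (List.mem_cons_of_mem _ m))]
    cases hs : pvSplit ys <;> simp [hs]

def pvF : Char → Char := fun c => if c = '\n' then ' ' else c

def pvPiece (line : String) : List Char :=
  if line = "\n" then ['\n'] else line.toList.map pvF

theorem pvNoNl (line : String) : '\n' ∉ line.toList.map pvF := by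
  intro h
  rcases List.mem_map.mp h with ⟨c, _, hc⟩
  by_cases h' : c = '\n' <;> simp [pvF, h'] at hc

theorem pvFold_inv : ∀ (c : List String) (ps : List String) (cur : String),
    (((c.foldl
      (fun (st : List String × String) line =>
        if line ≠ "\n" then (st.1, st.2 ++ PySem.Str.replace line "\n" " ")
        else (st.1 ++ [st.2], "")) (ps, cur))).1
      ++ [((c.foldl
      (fun (st : List String × String) line =>
        if line ≠ "\n" then (st.1, st.2 ++ PySem.Str.replace line "\n" " ")
        else (st.1 ++ [st.2], "")) (ps, cur))).2]).map String.toList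
    = ps.map String.toList
      ++ (pvSplit ((c.map pvPiece).flatten)).modifyHead (cur.toList ++ ·) := by
  intro c
  induction c with
  | nil => intro ps cur; cases hs : pvSplit [] <;> simp_all [pvSplit]
  | cons line rest ih =>
    intro ps cur
    by_cases hl : line = "\n"
    · subst hl
      rw [List.foldl_cons, if_neg (by simp), ih]
      simp only [List.map_cons, List.flatten_cons, pvPiece, reduceIte]
      rw [List.singleton_append, pvSplit, if_pos rfl]
      cases hs : pvSplit ((rest.map pvPiece).flatten) <;> simp [hs]
    · rw [List.foldl_cons, if_pos (by simpa using hl), ih]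
      simp only [List.map_cons, List.flatten_cons, pvPiece, if_neg hl]
      rw [pvSplit_append _ _ (pvNoNl line)]
      have ht : (cur ++ PySem.Str.replace line "\n" " ").toList
          = cur.toList ++ line.toList.map pvF := by
        rw [String.toList_append, PySem.Str.toList_replace]
        have : ("\n" : String).toList = ['\n'] := by simp
        rw [this]
        have : (" " : String).toList = [' '] := by simp
        rw [this, pvReplace_eq]
        rfl
      rw [ht]
      cases hs : pvSplit ((rest.map pvPiece).flatten) <;> simp [hs]

theorem pvFlattenIntersperse : ∀ (l : List (List Char)),
    (List.intersperse ([] : List Char) l).flatten = l.flatten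
  | [] => rfl
  | [a] => rfl
  | a :: b :: t => by
      have h : List.intersperse ([] : List Char) (a :: b :: t)
          = a :: [] :: List.intersperse [] (b :: t) := rfl
      simp [h, pvFlattenIntersperse (b :: t)]

theorem pvJoinToList (c : List String) :
    (PySem.Str.join ""
      (c.map (fun line => if line = "\n" then "\n" else PySem.Str.replace line "\n" " "))).toList
    = (c.map pvPiece).flatten := by
  rw [PySem.Str.toList_join, PySem.Chars.join]
  have h : ("" : String).toList = [] := by simp
  rw [h, List.intercalate, pvFlattenIntersperse]
  congr 1
  rw [List.map_map]
  apply List.map_congr_left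
  intro line _
  by_cases hl : line = "\n"
  · subst hl; simp [pvPiece]
  · simp only [Function.comp, if_neg hl, pvPiece, PySem.Str.toList_replace]
    have h1 : ("\n" : String).toList = ['\n'] := by simp
    have h2 : (" " : String).toList = [' '] := by simp
    rw [h1, h2, pvReplace_eq]
    rfl

theorem pvMain (c : List String) : convertToPassports c = convertToPassports_alt c := by
  apply List.map_injective_iff.mpr (fun a b hab => String.toList_inj.mp hab)
  have hA : (convertToPassports c).map String.toList = pvSplit ((c.map pvPiece).flatten) := by
    rw [convertToPassports]
    have h := pvFold_inv c [] ""
    simp only [List.map_nil, List.nil_append] at h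
    rw [h]
    have he : ("" : String).toList = [] := by simp
    rw [he]
    cases hs : pvSplit ((c.map pvPiece).flatten) <;> simp [hs]
  have hB : (convertToPassports_alt c).map String.toList = pvSplit ((c.map pvPiece).flatten) := by
    rw [convertToPassports_alt]
    have hs := PySem.Str.split?_map
      (PySem.Str.join "" (c.map (fun line => if line = "\n" then "\n" else PySem.Str.replace line "\n" " "))) "\n"
    have hnl : ("\n" : String).toList = ['\n'] := by simp
    rw [PySem.Chars.split?, if_neg (by simp [hnl]), hnl] at hs
    cases hsp : PySem.Str.split?
        (PySem.Str.join "" (c.map (fun line => if line = "\n" then "\n" else PySem.Str.replace line "\n" " "))) "\n" with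
    | none => rw [hsp] at hs; simp at hs
    | some r =>
      rw [hsp] at hs
      simp only [Option.map_some, Option.some.injEq] at hs
      simp only [Option.getD_some]
      rw [hs, pvSplitOn_eq, pvJoinToList]
  rw [hA, hB]

-- ===== VERDICT (by name: the statement is the Claim_ definition above) =====
theorem convertToPassports_spec : Claim_equal_convertToPassports := by
  intro c _
  unfold Spec_convertToPassports
  exact pvMain c
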